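-- pv_equiv track=rewrite | github.com/ZYY3544/student-value-backend | incremental_convergence.py | _expand_target_profiles
-- ===== SOURCE A (Python) =====
-- from typing import Dict, List, Tuple
--
-- def _expand_target_profiles(target_profiles: List[str], profile_order: List[str], expand_steps: int = 2) -> List[str]:
--     """逐步扩展常模范围，例如 [L, A1] 扩展2步 → [P2, P1, L, A1, A2, A3]"""
--     indices = []
--     for p in target_profiles:
--         if p in profile_order:
--             indices.append(profile_order.index(p))
--     if not indices:
--         return target_profiles
--
--     min_idx = max(0, min(indices) - expand_steps)
--     max_idx = min(len(profile_order) - 1, max(indices) + expand_steps)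
--     return profile_order[min_idx:max_idx + 1]
-- ===== SOURCE B (Python) =====
-- from typing import Dict, List, Tuple
--
-- def _expand_target_profiles(target_profiles: List[str], profile_order: List[str], expand_steps: int = 2) -> List[str]:
--     """One pass over profile_order with a working set: record first-occurrence min/max indices, then slice once."""
--     remaining = set(target_profiles)
--     lo = hi = None
--     for i, p in enumerate(profile_order):
--         if p in remaining:
--             remaining.discard(p)
--             if lo is None:
--                 lo = i
--             hi = i
--     if lo is None:
--         return target_profiles
--     return profile_order[max(0, lo - expand_steps): min(len(profile_order) - 1, hi + expand_steps) + 1]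
-- ===== Notes on version B (the rewrite author's own statement) =====
-- stated objective: faster
-- what changed: Replaces the per-target scan with its repeated list.index inner passes by a single enumerate pass over profile_order against a working set, tracking running first-occurrence min/max indices, then one slice.
import Mathlib
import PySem

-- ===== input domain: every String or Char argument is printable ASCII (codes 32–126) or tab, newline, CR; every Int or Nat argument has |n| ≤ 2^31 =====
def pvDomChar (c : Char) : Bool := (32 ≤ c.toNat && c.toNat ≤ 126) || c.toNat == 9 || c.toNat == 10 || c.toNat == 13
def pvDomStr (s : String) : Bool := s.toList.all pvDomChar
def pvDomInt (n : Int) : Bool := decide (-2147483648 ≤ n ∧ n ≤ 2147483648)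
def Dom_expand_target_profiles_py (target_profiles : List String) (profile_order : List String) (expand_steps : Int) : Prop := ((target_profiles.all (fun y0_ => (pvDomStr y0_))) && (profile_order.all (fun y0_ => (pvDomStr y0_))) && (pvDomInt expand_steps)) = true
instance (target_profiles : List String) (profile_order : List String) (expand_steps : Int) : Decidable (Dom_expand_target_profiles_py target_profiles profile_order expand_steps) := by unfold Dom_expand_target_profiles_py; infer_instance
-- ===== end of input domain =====

-- ===== PORT A =====
-- B is one enumerate pass with a working set instead of per-target membership+index scans; return values proved equal.
def expand_target_profiles_py (target_profiles : List String) (profile_order : List String) (expand_steps : Int) : List String :=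
  let indices : List Int := target_profiles.foldl
    (fun acc x =>
      if x ∈ profile_order then
        acc ++ [(((PySem.List.index? profile_order x).getD 0 : Nat) : Int)]
      else acc) []
  if indices = [] then target_profiles
  else
    let min_idx : Int := max 0 (((PySem.List.min? indices (fun y => y)).getD 0) - expand_steps)
    let max_idx : Int := min ((profile_order.length : Int) - 1) (((PySem.List.max? indices (fun y => y)).getD 0) + expand_steps)
    PySem.List.slice profile_order (some min_idx) (some (max_idx + 1))

-- ===== PORT B =====
def expand_target_profiles_py_alt (target_profiles : List String) (profile_order : List String) (expand_steps : Int) : List String :=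
  let st := (PySem.List.enumerate profile_order 0).foldl
    (fun (s : PySem.Set String × Option Int × Option Int) ip =>
      if PySem.Set.contains s.1 ip.2 then
        (PySem.Set.discard s.1 ip.2, some (s.2.1.getD ip.1), some ip.1)
      else s)
    (PySem.Set.ofList target_profiles, none, none)
  match st.2.1, st.2.2 with
  | some lo, some hi =>
      PySem.List.slice profile_order (some (max 0 (lo - expand_steps)))
        (some (min ((profile_order.length : Int) - 1) (hi + expand_steps) + 1))
  | _, _ => target_profiles

-- ===== PRECONDITION & SPEC =====
def Spec_expand_target_profiles_py (target_profiles : List String) (profile_order : List String) (expand_steps : Int) (out : List String) : Prop := out = expand_target_profiles_py_alt target_profiles profile_order expand_steps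
instance (target_profiles : List String) (profile_order : List String) (expand_steps : Int) (out : List String) : Decidable (Spec_expand_target_profiles_py target_profiles profile_order expand_steps out) := by unfold Spec_expand_target_profiles_py; infer_instance

-- ===== CLAIM (what is proved, stated in full; the proofs are below) =====
def Claim_equal_expand_target_profiles_py : Prop := ∀ (target_profiles : List String) (profile_order : List String) (expand_steps : Int), Dom_expand_target_profiles_py target_profiles profile_order expand_steps → Spec_expand_target_profiles_py target_profiles profile_order expand_steps (expand_target_profiles_py target_profiles profile_order expand_steps)

-- ===== LEMMAS AND PROOFS =====

-- The index of the first occurrence of x in p, as A's port records it.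
def etpIdx (p : List String) (x : String) : Int :=
  (((PySem.List.index? p x).getD 0 : Nat) : Int)

-- B's loop body, named for the proofs (definitionally the lambda in the port of B).
def etpStep (st : PySem.Set String × Option Int × Option Int) (ip : Int × String) :
    PySem.Set String × Option Int × Option Int :=
  if PySem.Set.contains st.1 ip.2 then
    (PySem.Set.discard st.1 ip.2, some (st.2.1.getD ip.1), some ip.1)
  else st

-- The indices at which B's loop fires a hit: first unseen target occurrences, in order.
def etpHits : PySem.Set String → List String → Int → List Int
  | _, [], _ => []
  | s, x :: xs, k =>
      if PySem.Set.contains s x then k :: etpHits (PySem.Set.discard s x) xs (k + 1)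
      else etpHits s xs (k + 1)

theorem etpHits_ge (q : List String) (s : PySem.Set String) (k : Int) :
    ∀ i ∈ etpHits s q k, k ≤ i := by
  induction q generalizing s k with
  | nil => simp [etpHits]
  | cons x xs ih =>
      intro i hi
      simp only [etpHits] at hi
      split at hi
      · rcases List.mem_cons.1 hi with h | h
        · omega
        · have := ih _ _ _ h; omega
      · have := ih _ _ _ hi; omega

theorem etpHits_pairwise (q : List String) (s : PySem.Set String) (k : Int) :
    (etpHits s q k).Pairwise (· < ·) := by
  induction q generalizing s k with
  | nil => simp [etpHits]
  | cons x xs ih =>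
      simp only [etpHits]
      split
      · refine List.pairwise_cons.2 ⟨?_, ih _ _⟩
        intro i hi
        have := etpHits_ge xs _ (k + 1) i hi
        omega
      · exact ih _ _

theorem etpIdx_cons_self (y : String) (xs : List String) : etpIdx (y :: xs) y = 0 := by
  unfold etpIdx
  rw [PySem.List.index?_cons_self]
  rfl

theorem etpIdx_cons_of_ne {x y : String} (xs : List String) (h : x ≠ y) (hx : x ∈ xs) :
    etpIdx (y :: xs) x = etpIdx xs x + 1 := by
  unfold etpIdx
  rw [PySem.List.index?_cons_of_ne xs (fun h' => h h'.symm)]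
  obtain ⟨n, hn⟩ := Option.isSome_iff_exists.1 ((PySem.List.index?_isSome_iff xs x).2 hx)
  rw [hn]
  simp

-- Membership: the hit indices are exactly the first-occurrence indices of the targets in s.
theorem etpHits_mem (q : List String) (s : PySem.Set String) (k : Int) (i : Int) :
    i ∈ etpHits s q k ↔ ∃ x, x ∈ s ∧ x ∈ q ∧ i = k + etpIdx q x := by
  induction q generalizing s k with
  | nil => simp [etpHits]
  | cons y xs ih =>
      simp only [etpHits]
      by_cases hy : y ∈ s
      · rw [if_pos ((PySem.Set.contains_iff s y).2 hy)]
        constructor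
        · intro hi
          rcases List.mem_cons.1 hi with h | h
          · exact ⟨y, hy, List.mem_cons_self, by rw [etpIdx_cons_self]; omega⟩
          · rcases (ih _ _).1 h with ⟨x, hxs, hxq, hxe⟩
            obtain ⟨hxs', hxy⟩ := (PySem.Set.mem_discard s y x).1 hxs
            exact ⟨x, hxs', List.mem_cons_of_mem _ hxq,
              by rw [etpIdx_cons_of_ne xs hxy hxq]; omega⟩
        · rintro ⟨x, hxs, hxq, hxe⟩
          by_cases hxy : x = y
          · subst hxy
            rw [etpIdx_cons_self] at hxe
            exact List.mem_cons.2 (Or.inl (by omega))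
          · have hxq' : x ∈ xs := (List.mem_cons.1 hxq).resolve_left hxy
            rw [etpIdx_cons_of_ne xs hxy hxq'] at hxe
            exact List.mem_cons.2 (Or.inr ((ih _ _).2
              ⟨x, (PySem.Set.mem_discard s y x).2 ⟨hxs, hxy⟩, hxq', by omega⟩))
      · rw [if_neg (by simp [hy])]
        rw [ih]
        constructor
        · rintro ⟨x, hxs, hxq, hxe⟩
          have hxy : x ≠ y := fun h => hy (h ▸ hxs)
          exact ⟨x, hxs, List.mem_cons_of_mem _ hxq,
            by rw [etpIdx_cons_of_ne xs hxy hxq]; omega⟩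
        · rintro ⟨x, hxs, hxq, hxe⟩
          have hxy : x ≠ y := fun h => hy (h ▸ hxs)
          have hxq' : x ∈ xs := (List.mem_cons.1 hxq).resolve_left hxy
          rw [etpIdx_cons_of_ne xs hxy hxq'] at hxe
          exact ⟨x, hxs, hxq', by omega⟩

-- Loop characterisation once lo/hi are set: lo stays, hi becomes the last hit (default the old hi).
theorem etpFold_some (q : List String) (s : PySem.Set String) (k lo0 hi0 : Int) :
    ((PySem.List.enumerate q k).foldl etpStep (s, some lo0, some hi0)).2 =
      (some lo0, some ((etpHits s q k).getLast?.getD hi0)) := by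
  induction q generalizing s k hi0 with
  | nil => simp [PySem.List.enumerate, etpHits]
  | cons x xs ih =>
      rw [PySem.List.enumerate_cons]
      simp only [List.foldl_cons, etpStep, etpHits]
      split
      · simp only [Option.getD_some]
        rw [ih]
        simp [List.getLast?_cons]
      · rw [ih]

-- Loop characterisation from the initial state: lo/hi are the first and last hit indices.
theorem etpFold_none (q : List String) (s : PySem.Set String) (k : Int) :
    ((PySem.List.enumerate q k).foldl etpStep (s, none, none)).2 =
      ((etpHits s q k).head?, (etpHits s q k).getLast?) := by
  induction q generalizing s k with
  | nil => simp [PySem.List.enumerate, etpHits]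
  | cons x xs ih =>
      rw [PySem.List.enumerate_cons]
      simp only [List.foldl_cons, etpStep, etpHits]
      split
      · rw [etpFold_some]
        simp [List.getLast?_cons]
      · rw [ih]

-- In a strictly increasing list the last element bounds every member.
theorem etp_last_bound : ∀ (l : List Int), l.Pairwise (· < ·) → ∀ (d : Int), ∀ i ∈ l, i ≤ l.getLast?.getD d := by
  intro l
  induction l with
  | nil => simp
  | cons a t ih =>
      intro hl d i hi
      rw [List.getLast?_cons]
      have h1 : ∀ y ∈ t, a < y := (List.pairwise_cons.1 hl).1
      have hl' := (List.pairwise_cons.1 hl).2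
      rcases List.mem_cons.1 hi with h | h
      · rw [h]
        cases t with
        | nil => simp
        | cons b u =>
            have hb := ih hl' a b List.mem_cons_self
            have hab := h1 b List.mem_cons_self
            simp only [Option.getD_some]
            omega
      · have hi' := ih hl' a i h
        cases t with
        | nil => simp at h
        | cons b u => simpa using hi'

-- A's indices list as filter-and-map (the loop body appended on a membership test).
theorem etp_indices_eq (t p : List String) :
    t.foldl (fun acc x => if x ∈ p then acc ++ [(((PySem.List.index? p x).getD 0 : Nat) : Int)] else acc)
        ([] : List Int) =
      (t.filter (fun x => decide (x ∈ p))).map (etpIdx p) := by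
  have h := PySem.List.foldl_append_if (fun x => decide (x ∈ p)) (etpIdx p) t ([] : List Int)
  simpa [etpIdx, decide_eq_true_eq] using h

-- ===== VERDICT (by name: the statement is the Claim_ definition above) =====
theorem expand_target_profiles_py_spec : Claim_equal_expand_target_profiles_py := by
  intro t p e _
  unfold Spec_expand_target_profiles_py
  unfold expand_target_profiles_py expand_target_profiles_py_alt
  rw [show (fun (s : PySem.Set String × Option Int × Option Int) (ip : Int × String) =>
        if PySem.Set.contains s.1 ip.2 then
          (PySem.Set.discard s.1 ip.2, some (s.2.1.getD ip.1), some ip.1)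
        else s) = etpStep from rfl]
  rw [etp_indices_eq]
  dsimp only
  rw [etpFold_none]
  set idx := (t.filter (fun x => decide (x ∈ p))).map (etpIdx p) with hidx
  set hits := etpHits (PySem.Set.ofList t) p 0 with hhits
  have hmem : ∀ i : Int, i ∈ idx ↔ i ∈ hits := by
    intro i
    rw [hhits, etpHits_mem]
    simp only [hidx, List.mem_map, List.mem_filter, decide_eq_true_eq, PySem.Set.mem_ofList]
    constructor
    · rintro ⟨x, ⟨hxt, hxp⟩, he⟩; exact ⟨x, hxt, hxp, by omega⟩
    · rintro ⟨x, hxt, hxp, he⟩; exact ⟨x, ⟨hxt, hxp⟩, by omega⟩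
  have hpw : hits.Pairwise (· < ·) := by rw [hhits]; exact etpHits_pairwise _ _ _
  rcases hh : hits with _ | ⟨h0, hrest⟩
  · -- no hit: both return the targets unchanged
    have hidxnil : idx = [] := by
      rcases hi : idx with _ | ⟨a, rest⟩
      · rfl
      · exact absurd ((hmem a).1 (hi ▸ List.mem_cons_self)) (by simp [hh])
    simp [hidxnil]
  · -- at least one hit
    have hne : (h0 :: hrest) ≠ ([] : List Int) := by simp
    set L := (h0 :: hrest).getLast hne with hL
    have hlast : (h0 :: hrest).getLast? = some L := List.getLast?_eq_some_getLast hne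
    have hLmem : L ∈ hits := by rw [hh]; exact List.getLast_mem hne
    have hh0mem : h0 ∈ hits := by rw [hh]; exact List.mem_cons_self
    have hidxne : ∃ a rest, idx = a :: rest := by
      rcases hi : idx with _ | ⟨a, rest⟩
      · exact absurd ((hmem h0).2 hh0mem) (by simp [hi])
      · exact ⟨a, rest, rfl⟩
    obtain ⟨a, rest, hi⟩ := hidxne
    -- h0 is the least hit, L the greatest
    have hmin : ∀ i ∈ hits, h0 ≤ i := by
      intro i hiMem
      rw [hh] at hiMem hpw
      rcases List.mem_cons.1 hiMem with h | h
      · omega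
      · exact le_of_lt ((List.pairwise_cons.1 hpw).1 i h)
    have hmax : ∀ i ∈ hits, i ≤ L := by
      intro i hiMem
      have := etp_last_bound hits hpw 0 i hiMem
      rw [hh, hlast] at this
      simpa using this
    -- A's min equals h0
    have hminA : (PySem.List.min? idx (fun y => y)).getD 0 = h0 := by
      rw [hi, PySem.List.min?_id_cons]
      have hsome : PySem.List.min? idx (fun y => y) = some (rest.foldl min a) := by
        rw [hi, PySem.List.min?_id_cons]
      have hm1 : rest.foldl min a ∈ idx := PySem.List.min?_mem hsome
      have hm2 : ∀ y ∈ idx, rest.foldl min a ≤ y := by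
        intro y hy
        simpa using PySem.List.min?_isMin hsome y hy
      have h1 : h0 ≤ rest.foldl min a := hmin _ ((hmem _).1 hm1)
      have h2 : rest.foldl min a ≤ h0 := hm2 _ ((hmem h0).2 hh0mem)
      simpa using le_antisymm h2 h1
    -- A's max equals L
    have hmaxA : (PySem.List.max? idx (fun y => y)).getD 0 = L := by
      rw [hi, PySem.List.max?_id_cons]
      have hsome : PySem.List.max? idx (fun y => y) = some (rest.foldl max a) := by
        rw [hi, PySem.List.max?_id_cons]
      have hm1 : rest.foldl max a ∈ idx := PySem.List.max?_mem hsome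
      have hm2 : ∀ y ∈ idx, y ≤ rest.foldl max a := by
        intro y hy
        simpa using PySem.List.max?_isMax hsome y hy
      have h1 : rest.foldl max a ≤ L := hmax _ ((hmem _).1 hm1)
      have h2 : L ≤ rest.foldl max a := hm2 _ ((hmem L).2 hLmem)
      simpa using le_antisymm h1 h2
    have hidxne' : idx ≠ [] := by rw [hi]; simp
    rw [if_neg hidxne', hlast]
    simp only [List.head?_cons]
    rw [hminA, hmaxA]
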